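-- pv_equiv track=rewrite | github.com/soroushv/Tweet2Vec | model_core/layers/fuse.py | fix_dims_array_shapes
-- ===== SOURCE A (Python) =====
-- def fix_dims_array_shapes(input_shapes, dim_fix):
--
--     if dim_fix is None:
--         return input_shapes
--     else:
--         dims = len(input_shapes[0])
--         if not all(len(sh) == dims for sh in input_shapes):
--             raise Exception("Not all inputs are of the same dimensionality")
--
--         result = []
--
--         dim_fix = list(dim_fix)
--         if dims > len(dim_fix):
--             diff=dims-len(dim_fix)
--             dim_fix = list(dim_fix) + [None] * diff
--
--         for sh, fx in zip(zip(*input_shapes), dim_fix):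
--             if fx is None:
--                 result.append(sh)
--             elif fx in {'lower', 'center', 'upper'}:
--                 result.append([min(sh)] * len(sh))
--             else:
--                 raise Exception("Wrong value")
--         return [tuple(sh) for sh in zip(*result)]
-- ===== SOURCE B (Python) =====
-- def fix_dims_array_shapes(input_shapes, dim_fix):
--     if dim_fix is None:
--         return input_shapes
--     dims = len(input_shapes[0])
--     for sh in input_shapes:
--         if len(sh) != dims:
--             raise Exception("Not all inputs are of the same dimensionality")
--     # mark which dimensions are fixed, validating dim_fix values in order
--     fixed = []
--     for i in range(dims):
--         fx = dim_fix[i] if i < len(dim_fix) else None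
--         if fx is None:
--             fixed.append(False)
--         elif fx in ('lower', 'center', 'upper'):
--             fixed.append(True)
--         else:
--             raise Exception("Wrong value")
--     # one running-minimum fold over the shapes (no transpose, no min() per column)
--     mins = list(input_shapes[0])
--     for sh in input_shapes[1:]:
--         for i in range(dims):
--             if sh[i] < mins[i]:
--                 mins[i] = sh[i]
--     return [tuple(mins[i] if fixed[i] else sh[i] for i in range(dims))
--             for sh in input_shapes]
-- ===== Notes on version B (the rewrite author's own statement) =====
-- stated objective: alternative
-- what changed: A transposes the shapes, rewrites whole columns with min() and transposes back; B validates dim_fix into a boolean fixed-flag table, computes all column minima in one running-minimum fold over the shapes (no transpose, no per-column min()), and rebuilds the output in a single row-major pass.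
-- intended difference: When the shapes are zero-dimensional (every input shape is the empty tuple) and dim_fix is not None, A's double transpose collapses the result to [] losing the number of inputs, while B returns one empty shape per input, which preserves the shape-per-input contract. — e.g. on fix_dims_array_shapes([[]], some []): A returns [], B returns [[]]
import Mathlib
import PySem

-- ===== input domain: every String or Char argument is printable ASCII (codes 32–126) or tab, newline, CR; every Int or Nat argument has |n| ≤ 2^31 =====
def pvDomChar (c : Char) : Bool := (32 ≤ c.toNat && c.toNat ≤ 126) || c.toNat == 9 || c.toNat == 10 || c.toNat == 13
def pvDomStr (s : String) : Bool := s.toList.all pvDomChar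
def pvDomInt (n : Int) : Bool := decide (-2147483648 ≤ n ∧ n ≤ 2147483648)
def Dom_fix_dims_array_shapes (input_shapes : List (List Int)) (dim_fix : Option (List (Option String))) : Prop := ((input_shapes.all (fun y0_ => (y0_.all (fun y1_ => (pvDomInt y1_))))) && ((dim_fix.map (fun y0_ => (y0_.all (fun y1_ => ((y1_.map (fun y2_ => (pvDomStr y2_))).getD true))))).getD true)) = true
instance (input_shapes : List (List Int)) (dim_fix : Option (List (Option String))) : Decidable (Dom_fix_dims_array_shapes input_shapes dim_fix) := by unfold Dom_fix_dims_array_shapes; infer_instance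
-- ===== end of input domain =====

-- B replaces A's transpose / column-rewrite / transpose-back pipeline by a fixed-dimension
-- flag table plus one running-minimum fold over the shapes and a row-major rebuild
-- (alternative decomposition, same cost); on zero-dimensional shapes B keeps one (empty)
-- output shape per input where A collapses to [].


-- ===== PORT A =====
-- Literal port of A.  Where the Python raises (IndexError on input_shapes == [],
-- Exception on ragged shapes / a wrong dim_fix value) the port returns [] (via the
-- default of headD/getD or the `none` of the step); all such inputs are excluded by Pre_.
def fix_dims_array_shapes (input_shapes : List (List Int)) (dim_fix : Option (List (Option String))) : List (List Int) :=
  match dim_fix with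
  | none => input_shapes
  | some df =>
    let dims := (input_shapes.headD []).length      -- len(input_shapes[0]); [] raises IndexError (excluded by Pre_)
    if !(input_shapes.all (fun sh => sh.length == dims)) then []   -- raise "Not all inputs ..."
    else
      let dfp := if dims > df.length then df ++ List.replicate (dims - df.length) none else df
      let cols := (List.range dims).map (fun j => input_shapes.map (fun sh => sh.getD j 0))  -- zip(*input_shapes)
      let step : List Int × Option String → Option (List Int) := fun p =>
        match p.2 with
        | none => some p.1
        | some s =>
          if s = "lower" ∨ s = "center" ∨ s = "upper"
          then some (List.replicate p.1.length ((PySem.List.min? p.1 (fun x => x)).getD 0))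
          else none                                   -- raise "Wrong value"
      match (cols.zip dfp).mapM step with
      | none => []                                    -- raise
      | some rcols =>
        match rcols with                              -- [tuple(sh) for sh in zip(*result)]
        | [] => []
        | c0 :: _ => (List.range c0.length).map (fun i => rcols.map (fun col => col.getD i 0))

-- ===== PORT B =====
-- Literal port of B: validate dim_fix into boolean fixed-flags, one running-minimum
-- fold over the shapes (no transpose, no per-column min), then a row-major rebuild.
def fix_dims_array_shapes_alt (input_shapes : List (List Int)) (dim_fix : Option (List (Option String))) : List (List Int) :=
  match dim_fix with
  | none => input_shapes
  | some df =>
    let dims := (input_shapes.headD []).length      -- len(input_shapes[0]); [] raises (excluded by Pre_)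
    if !(input_shapes.all (fun sh => sh.length == dims)) then []   -- raise
    else if !((List.range dims).all (fun i =>
          match df.getD i none with                   -- dim_fix[i] if i < len(dim_fix) else None
          | none => true
          | some s => s == "lower" || s == "center" || s == "upper")) then []  -- raise "Wrong value"
    else
      let fixed := (List.range dims).map (fun i => (df.getD i none).isSome)
      let mins := input_shapes.tail.foldl
          (fun acc sh => acc.zipWith (fun a b => if b < a then b else a) sh)
          (input_shapes.headD [])                     -- mins = list(input_shapes[0]); running minimum
      input_shapes.map (fun sh => (List.range dims).map (fun i =>
          if fixed.getD i false then mins.getD i 0 else sh.getD i 0))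

-- ===== PRECONDITION & SPEC =====
-- Pre_ excludes exactly the inputs where the Python A raises: empty input_shapes
-- (IndexError), ragged shapes, and a wrong (non-None, non lower/center/upper) value
-- among the first dims entries of dim_fix, all only when dim_fix is not None.
def Pre_fix_dims_array_shapes (input_shapes : List (List Int)) (dim_fix : Option (List (Option String))) : Prop :=
  dim_fix.isSome = true →
    (input_shapes ≠ [] ∧
     (∀ sh ∈ input_shapes, sh.length = (input_shapes.headD []).length) ∧
     (∀ o ∈ (dim_fix.getD []).take (input_shapes.headD []).length,
        o = none ∨ o = some "lower" ∨ o = some "center" ∨ o = some "upper"))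
instance (input_shapes : List (List Int)) (dim_fix : Option (List (Option String))) : Decidable (Pre_fix_dims_array_shapes input_shapes dim_fix) := by unfold Pre_fix_dims_array_shapes; infer_instance

def pvWitness_fix_dims_array_shapes : List (List Int) × Option (List (Option String)) :=
  ([[2, 3], [4, 1]], some [some "lower", none])

-- On zero-dimensional shapes (input_shapes nonempty, every shape empty) with dim_fix
-- not None, A returns [] (the double transpose drops all rows) while B returns one
-- empty shape per input; B's value preserves the one-output-shape-per-input contract.
def D_fix_dims_array_shapes (input_shapes : List (List Int)) (dim_fix : Option (List (Option String))) : Prop :=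
  dim_fix.isSome = true ∧ input_shapes ≠ [] ∧ input_shapes.headD [] = []
instance (input_shapes : List (List Int)) (dim_fix : Option (List (Option String))) : Decidable (D_fix_dims_array_shapes input_shapes dim_fix) := by unfold D_fix_dims_array_shapes; infer_instance

def Spec_fix_dims_array_shapes (input_shapes : List (List Int)) (dim_fix : Option (List (Option String))) (out : List (List Int)) : Prop := ¬ D_fix_dims_array_shapes input_shapes dim_fix → out = fix_dims_array_shapes_alt input_shapes dim_fix
instance (input_shapes : List (List Int)) (dim_fix : Option (List (Option String))) (out : List (List Int)) : Decidable (Spec_fix_dims_array_shapes input_shapes dim_fix out) := by unfold Spec_fix_dims_array_shapes; infer_instance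

def pvDiffWitness_fix_dims_array_shapes : List (List Int) × Option (List (Option String)) := ([[]], some [])
def pvDiffWitnessOut_fix_dims_array_shapes : (List (List Int)) × (List (List Int)) := ([], [[]])

-- ===== CLAIM (what is proved, stated in full; the proofs are below) =====
def Claim_unchanged_fix_dims_array_shapes : Prop := ∀ (input_shapes : List (List Int)) (dim_fix : Option (List (Option String))), Dom_fix_dims_array_shapes input_shapes dim_fix → Pre_fix_dims_array_shapes input_shapes dim_fix → Spec_fix_dims_array_shapes input_shapes dim_fix (fix_dims_array_shapes input_shapes dim_fix)
def Claim_changed_fix_dims_array_shapes : Prop := Dom_fix_dims_array_shapes (pvDiffWitness_fix_dims_array_shapes.1) (pvDiffWitness_fix_dims_array_shapes.2) ∧ Pre_fix_dims_array_shapes (pvDiffWitness_fix_dims_array_shapes.1) (pvDiffWitness_fix_dims_array_shapes.2) ∧ D_fix_dims_array_shapes (pvDiffWitness_fix_dims_array_shapes.1) (pvDiffWitness_fix_dims_array_shapes.2) ∧ fix_dims_array_shapes (pvDiffWitness_fix_dims_array_shapes.1) (pvDiffWitness_fix_dims_array_shapes.2) = pvDiffWitnessOut_fix_dims_array_shapes.1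 ∧ fix_dims_array_shapes_alt (pvDiffWitness_fix_dims_array_shapes.1) (pvDiffWitness_fix_dims_array_shapes.2) = pvDiffWitnessOut_fix_dims_array_shapes.2 ∧ pvDiffWitnessOut_fix_dims_array_shapes.1 ≠ pvDiffWitnessOut_fix_dims_array_shapes.2
def Claim_exact_fix_dims_array_shapes : Prop := ∀ (input_shapes : List (List Int)) (dim_fix : Option (List (Option String))), Dom_fix_dims_array_shapes input_shapes dim_fix → Pre_fix_dims_array_shapes input_shapes dim_fix → D_fix_dims_array_shapes input_shapes dim_fix → fix_dims_array_shapes input_shapes dim_fix ≠ fix_dims_array_shapes_alt input_shapes dim_fix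

-- ===== LEMMAS AND PROOFS =====

-- mapM over Option succeeds pointwise
theorem pv_mapM_some {α β : Type} (p : α → Option β) (f : α → β) (l : List α)
    (h : ∀ x ∈ l, p x = some (f x)) : l.mapM p = some (l.map f) := by
  induction l with
  | nil => simp
  | cons a t ih =>
    simp only [List.mapM_cons, List.map_cons, h a (List.mem_cons_self ..),
      ih (fun x hx => h x (List.mem_cons_of_mem _ hx))]
    rfl

theorem pv_getD_lt {α : Type} (l : List α) (i : Nat) (d : α) (h : i < l.length) :
    l.getD i d = l[i] := by
  simp [List.getD_eq_getElem?_getD, List.getElem?_eq_getElem h]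

theorem pv_getD_ge {α : Type} (l : List α) (i : Nat) (d : α) (h : l.length ≤ i) :
    l.getD i d = d := by
  simp [List.getD_eq_getElem?_getD, List.getElem?_eq_none h]

-- the padded dim_fix read at j < d is df.getD j none
theorem pv_pad_A (df : List (Option String)) (d j : Nat) (hj : j < d) :
    (if d > df.length then df ++ List.replicate (d - df.length) none else df).getD j none
      = df.getD j none := by
  split
  · simp only [List.getD_eq_getElem?_getD]
    by_cases hlt : j < df.length
    · rw [List.getElem?_append_left hlt]
    · have h1 : df.length ≤ j := by omega
      rw [List.getElem?_append_right h1, List.getElem?_replicate,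
        if_pos (by omega), List.getElem?_eq_none h1]; rfl
  · rfl

theorem pv_valid_mem (df : List (Option String)) (d j : Nat) (hj : j < d) (s : String)
    (hs : df.getD j none = some s) : some s ∈ df.take d := by
  by_cases hlt : j < df.length
  · rw [pv_getD_lt _ _ _ hlt] at hs
    have : (df.take d)[j]'(by simp; omega) = some s := by simpa using hs
    exact this ▸ List.getElem_mem _
  · rw [pv_getD_ge _ _ _ (by omega)] at hs; cases hs

-- the running-minimum fold, read back at one index, is the foldl-min over that column
theorem pv_mins_getD (t : List (List Int)) (acc : List Int) (d : Nat)
    (hacc : acc.length = d) (ht : ∀ sh ∈ t, sh.length = d) (j : Nat) (hj : j < d) :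
    (t.foldl (fun acc sh => acc.zipWith (fun a b => if b < a then b else a) sh) acc).getD j 0
      = (t.map (fun sh : List Int => sh.getD j 0)).foldl min (acc.getD j 0) := by
  induction t generalizing acc with
  | nil => rfl
  | cons s ts ih =>
    have hs : s.length = d := ht s (List.mem_cons_self ..)
    have hz : (acc.zipWith (fun a b => if b < a then b else a) s).length = d := by
      simp [List.length_zipWith, hacc, hs]
    simp only [List.foldl_cons, List.map_cons]
    rw [ih _ hz (fun x hx => ht x (List.mem_cons_of_mem _ hx))]
    congr 1
    rw [pv_getD_lt _ _ _ (by omega : j < (acc.zipWith (fun a b => if b < a then b else a) s).length),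
      List.getElem_zipWith, ← pv_getD_lt acc j 0 (by omega), ← pv_getD_lt s j 0 (by omega)]
    rcases lt_or_ge (s.getD j 0) (acc.getD j 0) with h | h
    · rw [if_pos h, min_eq_right (le_of_lt h)]
    · rw [if_neg (not_lt.mpr h), min_eq_left h]

theorem fix_dims_array_shapes_spec : Claim_unchanged_fix_dims_array_shapes := by
  intro L dfo _ hpre hnd
  cases dfo with
  | none => rfl
  | some df =>
    obtain ⟨hne, hlen, hval⟩ := hpre rfl
    have hd0 : L.headD [] ≠ [] := by
      intro h; exact hnd ⟨rfl, hne, h⟩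
    simp only [Option.getD_some] at hval
    set d := (L.headD []).length with hd
    set n := L.length with hn
    have hall : L.all (fun sh => sh.length == d) = true := by
      simp only [List.all_eq_true, beq_iff_eq]; exact hlen
    have hdpos : 0 < d :=
      Nat.pos_of_ne_zero (fun h => hd0 (List.length_eq_zero_iff.mp h))
    unfold fix_dims_array_shapes fix_dims_array_shapes_alt
    simp only [hall, Bool.not_true, Bool.false_eq_true, if_false, ← hd]
    -- B's validity check passes
    have hok : ((List.range d).all (fun i =>
        match df.getD i none with
        | none => true
        | some s => s == "lower" || s == "center" || s == "upper")) = true := by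
      simp only [List.all_eq_true, List.mem_range]
      intro j hj
      cases hfx : df.getD j none with
      | none => rfl
      | some s =>
        have := hval _ (pv_valid_mem df d j hj s hfx)
        rcases this with h | h | h | h <;> simp_all
    rw [hok]
    simp only [Bool.not_true, Bool.false_eq_true, if_false]
    -- A's zip of the transposed columns with the padded dim_fix, as a range-map
    have hdfp : (if d > df.length then df ++ List.replicate (d - df.length) none else df).length
        = max d df.length := by
      split <;> (try simp) <;> omega
    have hzip :
        ((List.range d).map (fun j => L.map (fun sh => sh.getD j 0))).zip
            (if d > df.length then df ++ List.replicate (d - df.length) none else df)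
          = (List.range d).map (fun j => (L.map (fun sh => sh.getD j 0), df.getD j none)) := by
      apply List.ext_getElem
      · rw [List.length_zip, hdfp]; simp only [List.length_map, List.length_range]; omega
      · intro j h1 h2
        have hj : j < d := by simpa using h2
        have hjz : j < (if d > df.length then df ++ List.replicate (d - df.length) none else df).length := by
          rw [hdfp]; omega
        simp only [List.getElem_zip, List.getElem_map, List.getElem_range]
        refine Prod.ext rfl ?_
        simp only []
        rw [← pv_pad_A df d j hj, pv_getD_lt _ _ _ hjz]
    rw [hzip]
    -- A's mapM succeeds (every dim_fix entry read is valid)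
    have hstepA : ((List.range d).map (fun j => (L.map (fun sh => sh.getD j 0), df.getD j none))).mapM
        (fun p => match p.2 with
          | none => some p.1
          | some s => if s = "lower" ∨ s = "center" ∨ s = "upper"
              then some (List.replicate p.1.length ((PySem.List.min? p.1 (fun x => x)).getD 0)) else none)
        = some (((List.range d).map (fun j => (L.map (fun sh => sh.getD j 0), df.getD j none))).map
            (fun p => match p.2 with
              | none => p.1
              | some _ => List.replicate p.1.length ((PySem.List.min? p.1 (fun x => x)).getD 0))) := by
      apply pv_mapM_some
      intro x hx
      simp only [List.mem_map, List.mem_range] at hx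
      obtain ⟨j, hj, rfl⟩ := hx
      cases hfx : df.getD j none with
      | none => rfl
      | some s =>
        have := hval _ (pv_valid_mem df d j hj s hfx)
        rcases this with h | h | h | h <;> simp_all
    rw [hstepA]
    -- A's result-column list is nonempty (d ≥ 1): expose its head so the match reduces
    obtain ⟨c0, cs, hcons⟩ : ∃ c0 cs,
        ((List.range d).map (fun j => (L.map (fun sh => sh.getD j 0), df.getD j none))).map
          (fun p => match p.2 with
            | none => p.1
            | some _ => List.replicate p.1.length ((PySem.List.min? p.1 (fun x => x)).getD 0))
          = c0 :: cs := by
      cases hX : ((List.range d).map (fun j => (L.map (fun sh => sh.getD j 0), df.getD j none))).map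
          (fun p => match p.2 with
            | none => p.1
            | some _ => List.replicate p.1.length ((PySem.List.min? p.1 (fun x => x)).getD 0)) with
      | nil => exact absurd (congrArg List.length hX) (by simp; omega)
      | cons a b => exact ⟨a, b, rfl⟩
    have hXget : ∀ j, j < d → (c0 :: cs)[j]?
        = some (match df.getD j none with
            | none => L.map (fun sh : List Int => sh.getD j 0)
            | some _ => List.replicate (L.map (fun sh : List Int => sh.getD j 0)).length
                ((PySem.List.min? (L.map (fun sh : List Int => sh.getD j 0)) (fun x => x)).getD 0)) := by
      intro j hj
      rw [← hcons, List.getElem?_map, List.getElem?_map, List.getElem?_range hj]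
      rfl
    have hXlen : (c0 :: cs).length = d := by rw [← hcons]; simp
    have hc0 : c0 = (match df.getD 0 none with
        | none => L.map (fun sh : List Int => sh.getD 0 0)
        | some _ => List.replicate (L.map (fun sh : List Int => sh.getD 0 0)).length
            ((PySem.List.min? (L.map (fun sh : List Int => sh.getD 0 0)) (fun x => x)).getD 0)) := by
      have h := hXget 0 hdpos
      simpa using h
    have hc0len : c0.length = n := by rw [hc0]; cases df.getD 0 none <;> simp [hn]
    rw [hcons]
    -- B's fixed-flag table, read back entrywise
    have hfixed : ∀ j, j < d → ((List.range d).map (fun i => (df.getD i none).isSome)).getD j false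
        = (df.getD j none).isSome := by
      intro j hj
      rw [List.getD_eq_getElem?_getD, List.getElem?_map, List.getElem?_range hj]
      rfl
    -- B's running-minimum fold, read back entrywise, equals Python min() of the column
    obtain ⟨s0, st, hLcons⟩ : ∃ s0 st, L = s0 :: st := by
      cases L with
      | nil => exact absurd rfl hne
      | cons a b => exact ⟨a, b, rfl⟩
    have hs0 : s0.length = d := hlen s0 (hLcons ▸ List.mem_cons_self ..)
    have hmins : ∀ j, j < d →
        (L.tail.foldl (fun acc sh => acc.zipWith (fun a b => if b < a then b else a) sh)
            (L.headD [])).getD j 0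
          = (PySem.List.min? (L.map (fun sh : List Int => sh.getD j 0)) (fun x => x)).getD 0 := by
      intro j hj
      rw [hLcons]
      simp only [List.tail_cons, List.headD_cons, List.map_cons]
      rw [PySem.List.min?_id_cons, Option.getD_some, List.foldl_map]
      rw [pv_mins_getD st s0 d hs0
        (fun x hx => hlen x (hLcons ▸ List.mem_cons_of_mem _ hx)) j hj]
      rw [List.foldl_map]
    -- both matches now reduce; compare the two n × d tables entry by entry
    show (List.range c0.length).map (fun i => (c0 :: cs).map (fun col => col.getD i 0))
        = L.map (fun sh => (List.range d).map (fun i =>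
            if ((List.range d).map (fun i => (df.getD i none).isSome)).getD i false
            then (L.tail.foldl (fun acc sh => acc.zipWith (fun a b => if b < a then b else a) sh)
                (L.headD [])).getD i 0
            else sh.getD i 0))
    rw [hc0len]
    apply List.ext_getElem
    · simp [hn]
    · intro i h1 h2
      have hi : i < n := by simpa [hn] using h2
      simp only [List.getElem_map, List.getElem_range]
      apply List.ext_getElem
      · simp only [List.length_map, List.length_range, List.length_cons]
        have := hXlen; simp only [List.length_cons] at this; omega
      · intro j h3 h4
        have hj : j < d := by
          simp only [List.length_map, List.length_cons] at h3
          have := hXlen; simp only [List.length_cons] at this; omega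
        simp only [List.getElem_map, List.getElem_range]
        rw [hfixed j hj, hmins j hj]
        have hXj := hXget j hj
        rw [List.getElem?_eq_getElem (by omega : j < (c0 :: cs).length)] at hXj
        have hXj' := Option.some.inj hXj
        rw [hXj']
        cases df.getD j none with
        | none =>
          rw [pv_getD_lt _ _ _ (by simpa [hn] using hi)]
          simp
        | some s =>
          rw [pv_getD_lt _ _ _ (by simpa [hn] using hi)]
          simp

theorem fix_dims_array_shapes_changed : Claim_changed_fix_dims_array_shapes := by
  unfold Claim_changed_fix_dims_array_shapes; decide

theorem fix_dims_array_shapes_tight : Claim_exact_fix_dims_array_shapes := by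
  intro L dfo _ hpre hD heq
  obtain ⟨hsome, hne, hhead⟩ := hD
  cases dfo with
  | none => cases hsome
  | some df =>
    obtain ⟨_, hlen, _⟩ := hpre rfl
    have hd : (L.headD []).length = 0 := by rw [hhead]; rfl
    have hA : fix_dims_array_shapes L (some df) = [] := by
      unfold fix_dims_array_shapes
      simp only [hd, List.range_zero, List.map_nil, List.zip_nil_left, List.mapM_nil]
      split <;> rfl
    have hB : (fix_dims_array_shapes_alt L (some df)).length = L.length := by
      unfold fix_dims_array_shapes_alt
      have hall0 : L.all (fun sh => sh.length == 0) = true := by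
        simp only [List.all_eq_true, beq_iff_eq]
        exact fun x hx => (hlen x hx).trans hd
      simp only [hd, List.range_zero, List.all_nil, Bool.not_true,
        Bool.false_eq_true, if_false]
      rw [show (L.all fun sh => sh.length == 0) = true from hall0]
      simp
    rw [← heq, hA] at hB
    exact hne (List.length_eq_zero_iff.mp hB.symm)
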